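-- pv_equiv track=rewrite | github.com/Sparshtrip/PABL_PYTHON | no_of_worker.py | minMen
-- ===== SOURCE A (Python) =====
-- def minMen(arr):
--     n = len(arr)
--     intervals = []
--
--     # Step 1: Build intervals
--     for i in range(n):
--         if arr[i] != -1:
--             start = max(0, i - arr[i])
--             end = min(n - 1, i + arr[i])
--             intervals.append((start, end))
--
--     # Step 2: Sort intervals by start
--     intervals.sort()
--
--     count = 0
--     i = 0
--     current_end = 0
--
--     while current_end < n:
--         farthest = current_end
--
--         while i < len(intervals) and intervals[i][0] <= current_end:
--             farthest = max(farthest, intervals[i][1] + 1)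
--             i += 1
--
--         if farthest == current_end:
--             return -1
--
--         count += 1
--         current_end = farthest
--
--     return count
-- ===== SOURCE B (Python) =====
-- def minMen(arr):
--     n = len(arr)
--
--     # Bucket: reach[s] = 1 + farthest position coverable by a worker whose
--     # coverage interval starts at s (0 if none starts there).
--     reach = [0] * n
--     for i, v in enumerate(arr):
--         if v != -1:
--             s = max(0, i - v)
--             if s < n:
--                 e = min(n - 1, i + v) + 1
--                 if e > reach[s]:
--                     reach[s] = e
--
--     # Jump-game sweep: each bucket index is visited exactly once.
--     count = 0
--     current_end = 0
--     s = 0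
--     while current_end < n:
--         farthest = current_end
--         for t in range(s, current_end + 1):
--             if reach[t] > farthest:
--                 farthest = reach[t]
--         s = current_end + 1
--         if farthest == current_end:
--             return -1
--         count += 1
--         current_end = farthest
--     return count
-- ===== Notes on version B (the rewrite author's own statement) =====
-- stated objective: faster
-- what changed: Replaces building and sorting an explicit interval list with an O(n) bucket array of the best reach per start index, swept once jump-game style instead of scanning a sorted interval list.
import Mathlib
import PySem

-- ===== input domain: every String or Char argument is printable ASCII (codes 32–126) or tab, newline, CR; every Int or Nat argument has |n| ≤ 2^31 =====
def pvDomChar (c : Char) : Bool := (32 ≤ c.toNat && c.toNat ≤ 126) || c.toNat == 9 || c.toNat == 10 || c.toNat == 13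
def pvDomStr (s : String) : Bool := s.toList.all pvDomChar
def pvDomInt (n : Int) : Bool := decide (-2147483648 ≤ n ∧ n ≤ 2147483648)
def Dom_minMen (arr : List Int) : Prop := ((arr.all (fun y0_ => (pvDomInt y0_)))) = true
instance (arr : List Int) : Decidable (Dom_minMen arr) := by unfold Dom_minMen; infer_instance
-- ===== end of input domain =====

-- B replaces A's sorted interval list by an O(n) bucket array of best reach per
-- start index swept once jump-game style (objective: faster).

-- ===== PORT A =====
-- Step 1: build the (start, end) intervals, exactly as A's loop appends them.
def buildIntervals (arr : List Int) : List (Int × Int) :=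
  (PySem.List.enumerate arr 0).foldl
    (fun acc p =>
      if p.2 ≠ -1 then
        acc ++ [(max 0 (p.1 - p.2), min ((arr.length : Int) - 1) (p.1 + p.2))]
      else acc) []

-- A's inner while loop: consume sorted intervals while their start ≤ current_end
-- (the moving index i is represented by the unconsumed suffix of the list).
def innerA (c : Int) : List (Int × Int) → Int → Int × List (Int × Int)
  | [], farthest => (farthest, [])
  | p :: rest, farthest =>
      if p.1 ≤ c then innerA c rest (max farthest (p.2 + 1)) else (farthest, p :: rest)

-- termination helper for A's outer while loop (farthest only grows)
theorem innerA_fst_ge (c : Int) (l : List (Int × Int)) (f : Int) :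
    f ≤ (innerA c l f).1 := by
  induction l generalizing f with
  | nil => exact le_rfl
  | cons p rest ih =>
      simp only [innerA]
      split
      · exact le_trans (le_max_left _ _) (ih _)
      · exact le_rfl

-- A's outer while loop.
def outerA (n : Int) (count : Int) (rest : List (Int × Int)) (c : Int) : Int :=
  if c < n then
    match hr : innerA c rest c with
    | (farthest, rest') =>
      if farthest = c then -1
      else outerA n (count + 1) rest' farthest
  else count
termination_by (n - c).toNat
decreasing_by
  have h := innerA_fst_ge c rest c
  rw [hr] at h
  omega

def minMen (arr : List Int) : Int :=
  outerA (arr.length : Int) 0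
    (PySem.List.sorted2 (buildIntervals arr) (fun p => p.1) (fun p => p.2)) 0

-- ===== PORT B =====
-- Bucket array: reach[s] = 1 + farthest position coverable by a worker whose
-- interval starts at s (0 if none starts there); built by one pass over arr.
def buildReach (arr : List Int) : List Int :=
  (PySem.List.enumerate arr 0).foldl
    (fun reach p =>
      if p.2 ≠ -1 then
        let s := max 0 (p.1 - p.2)
        if s < (arr.length : Int) then
          let e := min ((arr.length : Int) - 1) (p.1 + p.2) + 1
          if e > reach.getD s.toNat 0 then reach.set s.toNat e else reach
        else reach
      else reach)
    (List.replicate arr.length 0)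

-- B's inner for loop: sweep the bucket indices s..current_end once.
def innerB (reach : List Int) (c : Int) (s : Int) : Int :=
  (PySem.List.pyRange s (c + 1) 1).foldl
    (fun farthest t =>
      if reach.getD t.toNat 0 > farthest then reach.getD t.toNat 0 else farthest) c

-- termination helper for B's outer while loop (farthest only grows)
theorem foldl_bmax_ge (reach : List Int) (l : List Int) (f : Int) :
    f ≤ l.foldl
      (fun farthest t =>
        if reach.getD t.toNat 0 > farthest then reach.getD t.toNat 0 else farthest) f := by
  induction l generalizing f with
  | nil => exact le_rfl
  | cons t rest ih =>
      simp only [List.foldl_cons]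
      refine le_trans ?_ (ih _)
      split <;> omega

theorem innerB_ge (reach : List Int) (c : Int) (s : Int) : c ≤ innerB reach c s :=
  foldl_bmax_ge reach _ c

-- B's outer while loop.
def outerB (n : Int) (reach : List Int) (count : Int) (s : Int) (c : Int) : Int :=
  if c < n then
    match hr : innerB reach c s with
    | farthest =>
      if farthest = c then -1
      else outerB n reach (count + 1) (c + 1) farthest
  else count
termination_by (n - c).toNat
decreasing_by
  have h := innerB_ge reach c s
  rw [hr] at h
  omega

def minMen_alt (arr : List Int) : Int :=
  outerB (arr.length : Int) (buildReach arr) 0 0 0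

-- ===== PRECONDITION & SPEC =====
def Spec_minMen (arr : List Int) (out : Int) : Prop := out = minMen_alt arr
instance (arr : List Int) (out : Int) : Decidable (Spec_minMen arr out) := by unfold Spec_minMen; infer_instance

-- ===== CLAIM (what is proved, stated in full; the proofs are below) =====
def Claim_equal_minMen : Prop := ∀ (arr : List Int), Dom_minMen arr → Spec_minMen arr (minMen arr)

-- ===== LEMMAS AND PROOFS =====

-- The common abstraction: one greedy step from current_end c is
-- F ivs c = max(c, max { e+1 | (s,e) ∈ ivs, s ≤ c }).
def stepF (c m : Int) (p : Int × Int) : Int := if p.1 ≤ c then max m (p.2 + 1) else m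

def Ffun (ivs : List (Int × Int)) (c : Int) : Int := ivs.foldl (stepF c) c

theorem foldl_stepF_ge (c : Int) (l : List (Int × Int)) (m : Int) :
    m ≤ l.foldl (stepF c) m := by
  induction l generalizing m with
  | nil => simp
  | cons p t ih =>
      refine le_trans ?_ (ih (stepF c m p))
      simp [stepF]; split <;> omega

theorem foldl_stepF_elem (c : Int) (l : List (Int × Int)) :
    ∀ (m : Int) (p : Int × Int), p ∈ l → p.1 ≤ c → p.2 + 1 ≤ l.foldl (stepF c) m := by
  induction l with
  | nil => intro m p hp; simp at hp
  | cons q t ih =>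
      intro m p hp hc
      simp only [List.foldl_cons]
      rcases List.mem_cons.mp hp with rfl | h
      · exact le_trans (by simp [stepF, hc]) (foldl_stepF_ge c t (stepF c m p))
      · exact ih (stepF c m q) p h hc

theorem foldl_stepF_le (c : Int) (l : List (Int × Int)) (M : Int)
    (hl : ∀ p ∈ l, p.1 ≤ c → p.2 + 1 ≤ M) :
    ∀ m : Int, m ≤ M → l.foldl (stepF c) m ≤ M := by
  induction l with
  | nil => intro m hm; simpa
  | cons q t ih =>
      intro m hm
      simp only [List.foldl_cons]
      refine ih (fun p hp => hl p (List.mem_cons_of_mem _ hp)) _ ?_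
      have := hl q (List.mem_cons_self ..)
      simp only [stepF]
      split
      · rename_i hq; have := this hq; omega
      · exact hm

theorem foldl_stepF_const (c : Int) (l : List (Int × Int)) (m : Int)
    (hl : ∀ p ∈ l, p.1 ≤ c → p.2 + 1 ≤ m) :
    l.foldl (stepF c) m = m :=
  le_antisymm (foldl_stepF_le c l m hl m le_rfl) (foldl_stepF_ge c l m)

theorem Ffun_ge (ivs : List (Int × Int)) (c : Int) : c ≤ Ffun ivs c :=
  foldl_stepF_ge c ivs c

-- The abstract greedy loop both ports implement.
def gLoop (n : Int) (ivs : List (Int × Int)) (count c : Int) : Int :=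
  if c < n then
    if Ffun ivs c = c then -1 else gLoop n ivs (count + 1) (Ffun ivs c)
  else count
termination_by (n - c).toNat
decreasing_by
  have := Ffun_ge ivs c
  omega

-- ---------- A-side ----------

theorem pairwise_insertBy {α : Type} {R : α → α → Prop} (before : α → α → Bool)
    (hT : ∀ a b, before a b = true → R a b) (hF : ∀ a b, before a b = false → R b a)
    (htrans : ∀ a b c, R a b → R b c → R a c)
    (x : α) (ys : List α) (h : ys.Pairwise R) :
    (PySem.List.insertBy before x ys).Pairwise R := by
  induction ys with
  | nil => simp [PySem.List.insertBy]
  | cons y t ih =>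
      rcases List.pairwise_cons.mp h with ⟨hy, ht⟩
      by_cases hb : before x y = true
      · rw [PySem.List.insertBy, if_pos hb]
        refine List.pairwise_cons.mpr ⟨?_, h⟩
        intro z hz
        rcases List.mem_cons.mp hz with rfl | hz
        · exact hT _ _ hb
        · exact htrans _ _ _ (hT _ _ hb) (hy z hz)
      · rw [PySem.List.insertBy, if_neg hb]
        refine List.pairwise_cons.mpr ⟨?_, ih ht⟩
        intro z hz
        rcases (PySem.List.mem_insertBy before x z t).mp hz with rfl | hz
        · exact hF _ _ (by simpa using hb)
        · exact hy z hz

theorem pairwise_foldl_insertBy {α : Type} {R : α → α → Prop} (before : α → α → Bool)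
    (hT : ∀ a b, before a b = true → R a b) (hF : ∀ a b, before a b = false → R b a)
    (htrans : ∀ a b c, R a b → R b c → R a c) :
    ∀ (xs acc : List α), acc.Pairwise R →
      (xs.foldl (fun acc x => PySem.List.insertBy before x acc) acc).Pairwise R := by
  intro xs
  induction xs with
  | nil => intro acc h; simpa
  | cons x t ih =>
      intro acc h
      exact ih _ (pairwise_insertBy before hT hF htrans x acc h)

theorem sorted2_pairwise_fst (xs : List (Int × Int)) :
    (PySem.List.sorted2 xs (fun p => p.1) (fun p => p.2)).Pairwise
      (fun a b => a.1 ≤ b.1) := by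
  show (List.foldl _ [] xs).Pairwise _
  refine pairwise_foldl_insertBy _ ?_ ?_ ?_ xs [] (by simp)
  · intro a b hab
    simp at hab
    omega
  · intro a b hab
    simp at hab
    omega
  · intro a b c h1 h2
    omega

theorem innerA_spec (c : Int) (l : List (Int × Int)) (f : Int)
    (hs : l.Pairwise (fun a b => a.1 ≤ b.1)) :
    (innerA c l f).1 = l.foldl (stepF c) f ∧
    (innerA c l f).2.Pairwise (fun a b => a.1 ≤ b.1) ∧
    ∃ pre, l = pre ++ (innerA c l f).2 ∧
      ∀ p ∈ pre, p.1 ≤ c ∧ p.2 + 1 ≤ (innerA c l f).1 := by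
  induction l generalizing f with
  | nil => exact ⟨rfl, List.Pairwise.nil, [], rfl, by simp⟩
  | cons p rest ih =>
      by_cases hle : p.1 ≤ c
      · obtain ⟨h1, h2, pre, hpre, hmem⟩ :=
          ih (max f (p.2 + 1)) ((List.pairwise_cons.mp hs).2)
        have heq : innerA c (p :: rest) f = innerA c rest (max f (p.2 + 1)) := by
          simp only [innerA, if_pos hle]
        rw [heq]
        refine ⟨?_, h2, p :: pre, by rw [List.cons_append, ← hpre], ?_⟩
        · rw [h1, List.foldl_cons]
          congr 1
          simp [stepF, hle]
        · intro q hq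
          rcases List.mem_cons.mp hq with rfl | hq'
          · refine ⟨hle, ?_⟩
            have := innerA_fst_ge c rest (max f (q.2 + 1))
            omega
          · exact hmem q hq'
      · have heq : innerA c (p :: rest) f = (f, p :: rest) := by
          simp only [innerA, if_neg hle]
        rw [heq]
        refine ⟨?_, hs, [], rfl, by simp⟩
        rw [List.foldl_cons]
        have hstep : stepF c f p = f := by simp [stepF, hle]
        rw [hstep, foldl_stepF_const]
        intro q hq hqc
        have := (List.pairwise_cons.mp hs).1 q hq
        omega

theorem Ffun_eq_innerA (ivs : List (Int × Int)) (c : Int) (rest pre : List (Int × Int))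
    (hsplit : ivs = pre ++ rest)
    (hpre : ∀ p ∈ pre, p.1 ≤ c ∧ p.2 + 1 ≤ c)
    (hs : rest.Pairwise (fun a b => a.1 ≤ b.1)) :
    Ffun ivs c = (innerA c rest c).1 := by
  obtain ⟨h1, -, -⟩ := innerA_spec c rest c hs
  rw [h1]
  unfold Ffun
  rw [hsplit, List.foldl_append, foldl_stepF_const c pre c (fun p hp _ => (hpre p hp).2)]

theorem outerA_eq (n : Int) (ivs : List (Int × Int)) (count : Int)
    (rest : List (Int × Int)) (c : Int) :
    rest.Pairwise (fun a b => a.1 ≤ b.1) →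
    (∃ pre, ivs = pre ++ rest ∧ ∀ p ∈ pre, p.1 ≤ c ∧ p.2 + 1 ≤ c) →
    outerA n count rest c = gLoop n ivs count c := by
  fun_induction outerA n count rest c with
  | case1 count rest c rest' hc hr =>
      intro hs hex
      obtain ⟨pre, hsplit, hmem⟩ := hex
      have hF : Ffun ivs c = c := by
        rw [Ffun_eq_innerA ivs c rest pre hsplit hmem hs, hr]
      rw [gLoop, if_pos hc, if_pos hF]
  | case2 count rest c hc farthest rest' hr hfc ih =>
      intro hs hex
      obtain ⟨pre, hsplit, hmem⟩ := hex
      have hF : Ffun ivs c = farthest := by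
        rw [Ffun_eq_innerA ivs c rest pre hsplit hmem hs, hr]
      have hcf : c ≤ farthest := by
        have := innerA_fst_ge c rest c
        rw [hr] at this
        exact this
      obtain ⟨-, hpw', preC, hsplitC, hmemC⟩ := innerA_spec c rest c hs
      rw [hr] at hpw' hsplitC hmemC
      rw [gLoop, if_pos hc, if_neg (by rw [hF]; exact hfc), hF]
      refine ih hpw' ⟨pre ++ preC, ?_, ?_⟩
      · rw [hsplit, hsplitC, List.append_assoc]
      · intro p hp
        rcases List.mem_append.mp hp with hp' | hp'
        · have := hmem p hp'
          omega
        · have := hmemC p hp'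
          omega
  | case3 count rest c hc =>
      intro _ _
      rw [gLoop, if_neg hc]

-- ---------- B-side ----------

def ReachInv (n : Int) (ivs : List (Int × Int)) (reach : List Int) : Prop :=
  reach.length = n.toNat ∧
  (∀ t : Nat, reach.getD t 0 = 0 ∨
      ∃ p ∈ ivs, p.1 = (t : Int) ∧ p.2 + 1 = reach.getD t 0) ∧
  (∀ p ∈ ivs, 0 ≤ p.1 ∧ (p.1 < n → p.2 + 1 ≤ reach.getD p.1.toNat 0))

theorem reachInv_step (n : Int) (acc : List (Int × Int)) (reach : List Int)
    (h : ReachInv n acc reach) (p : Int × Int) :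
    ReachInv n
      (if p.2 ≠ -1 then acc ++ [(max 0 (p.1 - p.2), min (n - 1) (p.1 + p.2))] else acc)
      (if p.2 ≠ -1 then
        let s := max 0 (p.1 - p.2)
        if s < n then
          let e := min (n - 1) (p.1 + p.2) + 1
          if e > reach.getD s.toNat 0 then reach.set s.toNat e else reach
        else reach
      else reach) := by
  obtain ⟨hlen, h2, h3⟩ := h
  by_cases hv : p.2 ≠ -1
  · simp only [if_pos hv]
    by_cases hsn : max 0 (p.1 - p.2) < n
    · simp only [if_pos hsn]
      by_cases hbig : min (n - 1) (p.1 + p.2) + 1 > reach.getD (max 0 (p.1 - p.2)).toNat 0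
      · simp only [if_pos hbig]
        have hs0 : (0 : Int) ≤ max 0 (p.1 - p.2) := le_max_left _ _
        have hsl : (max 0 (p.1 - p.2)).toNat < reach.length := by omega
        have hget_self :
            (reach.set (max 0 (p.1 - p.2)).toNat (min (n - 1) (p.1 + p.2) + 1)).getD
              (max 0 (p.1 - p.2)).toNat 0 = min (n - 1) (p.1 + p.2) + 1 := by
          rw [List.getD_eq_getElem?_getD, List.getElem?_set_self hsl]
          rfl
        have hget_ne : ∀ t : Nat, t ≠ (max 0 (p.1 - p.2)).toNat →
            (reach.set (max 0 (p.1 - p.2)).toNat (min (n - 1) (p.1 + p.2) + 1)).getD t 0 =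
              reach.getD t 0 := by
          intro t ht
          rw [List.getD_eq_getElem?_getD, List.getElem?_set_ne (by omega),
            ← List.getD_eq_getElem?_getD]
        have hmono : ∀ t : Nat, reach.getD t 0 ≤
            (reach.set (max 0 (p.1 - p.2)).toNat (min (n - 1) (p.1 + p.2) + 1)).getD t 0 := by
          intro t
          by_cases hts : t = (max 0 (p.1 - p.2)).toNat
          · subst hts; rw [hget_self]; omega
          · rw [hget_ne t hts]
        refine ⟨by simpa using hlen, ?_, ?_⟩
        · intro t
          by_cases hts : t = (max 0 (p.1 - p.2)).toNat
          · subst hts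
            right
            refine ⟨(max 0 (p.1 - p.2), min (n - 1) (p.1 + p.2)),
              List.mem_append_right _ (List.mem_singleton_self _), ?_, ?_⟩
            · simp only
              omega
            · simp only
              rw [hget_self]
          · rcases h2 t with h0 | ⟨q, hq, hqt, hqe⟩
            · left; rw [hget_ne t hts]; exact h0
            · right; exact ⟨q, List.mem_append_left _ hq, hqt, by rw [hget_ne t hts]; exact hqe⟩
        · intro q hq
          rcases List.mem_append.mp hq with hq' | hq'
          · obtain ⟨hq0, hqb⟩ := h3 q hq'
            exact ⟨hq0, fun hn => le_trans (hqb hn) (hmono _)⟩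
          · have : q = (max 0 (p.1 - p.2), min (n - 1) (p.1 + p.2)) := by
              simpa using hq'
            subst this
            refine ⟨le_max_left _ _, fun _ => ?_⟩
            simp only
            rw [hget_self]
      · simp only [if_neg hbig]
        refine ⟨hlen, ?_, ?_⟩
        · intro t
          rcases h2 t with h0 | ⟨q, hq, hqt, hqe⟩
          · exact Or.inl h0
          · exact Or.inr ⟨q, List.mem_append_left _ hq, hqt, hqe⟩
        · intro q hq
          rcases List.mem_append.mp hq with hq' | hq'
          · exact h3 q hq'
          · have : q = (max 0 (p.1 - p.2), min (n - 1) (p.1 + p.2)) := by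
              simpa using hq'
            subst this
            refine ⟨le_max_left _ _, fun _ => ?_⟩
            simp only
            omega
    · simp only [if_neg hsn]
      refine ⟨hlen, ?_, ?_⟩
      · intro t
        rcases h2 t with h0 | ⟨q, hq, hqt, hqe⟩
        · exact Or.inl h0
        · exact Or.inr ⟨q, List.mem_append_left _ hq, hqt, hqe⟩
      · intro q hq
        rcases List.mem_append.mp hq with hq' | hq'
        · exact h3 q hq'
        · have : q = (max 0 (p.1 - p.2), min (n - 1) (p.1 + p.2)) := by
            simpa using hq'
          subst this
          exact ⟨le_max_left _ _, fun hn => absurd hn hsn⟩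
  · simp only [if_neg hv]
    exact ⟨hlen, h2, h3⟩

theorem reachInv_fold (n : Int) (l : List (Int × Int)) :
    ∀ (acc : List (Int × Int)) (reach : List Int), ReachInv n acc reach →
      ReachInv n
        (l.foldl (fun acc p =>
          if p.2 ≠ -1 then acc ++ [(max 0 (p.1 - p.2), min (n - 1) (p.1 + p.2))] else acc) acc)
        (l.foldl (fun reach p =>
          if p.2 ≠ -1 then
            let s := max 0 (p.1 - p.2)
            if s < n then
              let e := min (n - 1) (p.1 + p.2) + 1
              if e > reach.getD s.toNat 0 then reach.set s.toNat e else reach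
            else reach
          else reach) reach) := by
  induction l with
  | nil => intro acc reach h; exact h
  | cons p t ih =>
      intro acc reach h
      exact ih _ _ (reachInv_step n acc reach h p)

theorem reachInv_build (arr : List Int) :
    ReachInv (arr.length : Int) (buildIntervals arr) (buildReach arr) := by
  unfold buildIntervals buildReach
  refine reachInv_fold (arr.length : Int) (PySem.List.enumerate arr 0) [] _ ⟨?_, ?_, ?_⟩
  · simp
  · intro t
    left
    rw [List.getD_eq_getElem?_getD]
    rcases Nat.lt_or_ge t arr.length with h | h
    · rw [List.getElem?_eq_getElem (by simpa using h)]
      simp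
    · rw [List.getElem?_eq_none_iff.mpr (by simpa using h)]
      rfl
  · intro q hq
    simp at hq

theorem foldl_bmax_elem (reach : List Int) (l : List Int) :
    ∀ (f t : Int), t ∈ l →
      reach.getD t.toNat 0 ≤ l.foldl
        (fun farthest u =>
          if reach.getD u.toNat 0 > farthest then reach.getD u.toNat 0 else farthest) f := by
  induction l with
  | nil => intro f t ht; simp at ht
  | cons u rest ih =>
      intro f t ht
      simp only [List.foldl_cons]
      rcases List.mem_cons.mp ht with rfl | ht'
      · exact le_trans (by split <;> omega) (foldl_bmax_ge reach rest _)
      · exact ih _ t ht'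

theorem foldl_bmax_le (reach : List Int) (l : List Int) (M : Int)
    (h : ∀ t ∈ l, reach.getD t.toNat 0 ≤ M) :
    ∀ f : Int, f ≤ M → l.foldl
      (fun farthest u =>
        if reach.getD u.toNat 0 > farthest then reach.getD u.toNat 0 else farthest) f ≤ M := by
  induction l with
  | nil => intro f hf; simpa
  | cons u rest ih =>
      intro f hf
      simp only [List.foldl_cons]
      refine ih (fun t ht => h t (List.mem_cons_of_mem _ ht)) _ ?_
      have := h u (List.mem_cons_self ..)
      split <;> omega

theorem Ffun_eq_innerB (n : Int) (ivs : List (Int × Int)) (reach : List Int)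
    (h2 : ∀ t : Nat, reach.getD t 0 = 0 ∨
        ∃ p ∈ ivs, p.1 = (t : Int) ∧ p.2 + 1 = reach.getD t 0)
    (h3 : ∀ p ∈ ivs, 0 ≤ p.1 ∧ (p.1 < n → p.2 + 1 ≤ reach.getD p.1.toNat 0))
    (s c : Int) (hs0 : 0 ≤ s) (hc0 : 0 ≤ c) (hcn : c < n)
    (hub : ∀ t : Nat, (t : Int) < s → reach.getD t 0 ≤ c) :
    Ffun ivs c = innerB reach c s := by
  unfold innerB
  apply le_antisymm
  · show ivs.foldl (stepF c) c ≤ _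
    refine foldl_stepF_le c ivs _ ?_ c (foldl_bmax_ge reach _ c)
    intro p hp hpc
    obtain ⟨hp0, hpr⟩ := h3 p hp
    have hbound := hpr (by omega)
    have ht : (p.1.toNat : Int) = p.1 := Int.toNat_of_nonneg hp0
    by_cases h' : p.1 < s
    · have hle := hub p.1.toNat (by omega)
      have hge := foldl_bmax_ge reach (PySem.List.pyRange s (c + 1) 1) c
      omega
    · have hmem : p.1 ∈ PySem.List.pyRange s (c + 1) 1 :=
        PySem.List.mem_pyRange_one.mpr ⟨by omega, by omega⟩
      have helem := foldl_bmax_elem reach (PySem.List.pyRange s (c + 1) 1) c p.1 hmem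
      omega
  · refine foldl_bmax_le reach _ _ ?_ c (Ffun_ge ivs c)
    intro t htmem
    obtain ⟨hts, htc⟩ := PySem.List.mem_pyRange_one.mp htmem
    rcases h2 t.toNat with h0 | ⟨p, hp, hpt, hpe⟩
    · rw [h0]
      exact le_trans hc0 (Ffun_ge ivs c)
    · have htn : ((t.toNat : Nat) : Int) = t := Int.toNat_of_nonneg (by omega)
      have := foldl_stepF_elem c ivs c p hp (by omega)
      unfold Ffun
      omega

theorem outerB_eq (n : Int) (ivs : List (Int × Int)) (reach : List Int)
    (h2 : ∀ t : Nat, reach.getD t 0 = 0 ∨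
        ∃ p ∈ ivs, p.1 = (t : Int) ∧ p.2 + 1 = reach.getD t 0)
    (h3 : ∀ p ∈ ivs, 0 ≤ p.1 ∧ (p.1 < n → p.2 + 1 ≤ reach.getD p.1.toNat 0))
    (count s c : Int) :
    0 ≤ s → 0 ≤ c →
    (∀ t : Nat, (t : Int) < s → reach.getD t 0 ≤ c) →
    outerB n reach count s c = gLoop n ivs count c := by
  fun_induction outerB n reach count s c with
  | case1 count s c hc hr =>
      intro hs0 hc0 hub
      have hF : Ffun ivs c = c := by
        rw [Ffun_eq_innerB n ivs reach h2 h3 s c hs0 hc0 hc hub, hr]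
      rw [gLoop, if_pos hc, if_pos hF]
  | case2 count s c hc hfc ih =>
      intro hs0 hc0 hub
      have hF : Ffun ivs c = innerB reach c s :=
        Ffun_eq_innerB n ivs reach h2 h3 s c hs0 hc0 hc hub
      have hcf : c ≤ innerB reach c s := innerB_ge reach c s
      rw [gLoop, if_pos hc, if_neg (by rw [hF]; exact hfc), hF]
      refine ih (by omega) (by omega) ?_
      intro t ht
      by_cases h' : (t : Int) < s
      · have := hub t h'
        omega
      · have hmem : (t : Int) ∈ PySem.List.pyRange s (c + 1) 1 :=
          PySem.List.mem_pyRange_one.mpr ⟨by omega, by omega⟩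
        have helem := foldl_bmax_elem reach (PySem.List.pyRange s (c + 1) 1) c (t : Int) hmem
        rw [Int.toNat_natCast] at helem
        exact helem
  | case3 count s c hc =>
      intro _ _ _
      rw [gLoop, if_neg hc]

-- ===== VERDICT (by name: the statement is the Claim_ definition above) =====
theorem minMen_spec : Claim_equal_minMen := by
  intro arr _
  unfold Spec_minMen minMen minMen_alt
  obtain ⟨hlen, h2, h3⟩ := reachInv_build arr
  have hperm := PySem.List.sorted2_perm (buildIntervals arr)
    (fun p : Int × Int => p.1) (fun p : Int × Int => p.2) false
  have hmem : ∀ p : Int × Int,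
      p ∈ PySem.List.sorted2 (buildIntervals arr) (fun p => p.1) (fun p => p.2) ↔
        p ∈ buildIntervals arr := fun p => hperm.mem_iff
  have h2' : ∀ t : Nat, (buildReach arr).getD t 0 = 0 ∨
      ∃ p ∈ PySem.List.sorted2 (buildIntervals arr) (fun p => p.1) (fun p => p.2),
        p.1 = (t : Int) ∧ p.2 + 1 = (buildReach arr).getD t 0 := by
    intro t
    rcases h2 t with h0 | ⟨p, hp, hpp⟩
    · exact Or.inl h0
    · exact Or.inr ⟨p, (hmem p).mpr hp, hpp⟩
  have h3' : ∀ p ∈ PySem.List.sorted2 (buildIntervals arr) (fun p => p.1) (fun p => p.2),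
      0 ≤ p.1 ∧ (p.1 < (arr.length : Int) → p.2 + 1 ≤ (buildReach arr).getD p.1.toNat 0) :=
    fun p hp => h3 p ((hmem p).mp hp)
  rw [outerA_eq (arr.length : Int) _ 0 _ 0 (sorted2_pairwise_fst _) ⟨[], rfl, by simp⟩]
  rw [outerB_eq (arr.length : Int)
      (PySem.List.sorted2 (buildIntervals arr) (fun p => p.1) (fun p => p.2))
      (buildReach arr) h2' h3' 0 0 0 le_rfl le_rfl (fun t ht => absurd ht (by omega))]
  rw [List.nil_append]
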